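-- pv_equiv track=rewrite | github.com/hardiksondagar/cricvox | scripts/convert_html_to_json.py | _detect_innings_breaks
-- ===== SOURCE A (Python) =====
-- def _detect_innings_breaks(events: list[dict]) -> list[list[dict]]:
--     """Split events into innings based on over number resets."""
--     if not events:
--         return []
--     innings: list[list[dict]] = []
--     current: list[dict] = [events[0]]
--     prev_over = events[0]["over"]
--     for event in events[1:]:
--         if event["over"] < prev_over - 1:
--             innings.append(current)
--             current = []
--         current.append(event)
--         prev_over = event["over"]
--     if current:
--         innings.append(current)
--     return innings
-- ===== SOURCE B (Python) =====
-- def _detect_innings_breaks(events: list[dict]) -> list[list[dict]]: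
--     """Split events into innings based on over number resets."""
--     if not events:
--         return []
--     cuts = [i for i, (prev, ev) in enumerate(zip(events, events[1:]), 1)
--             if ev["over"] < prev["over"] - 1]
--     bounds = [0] + cuts + [len(events)]
--     return [events[a:b] for a, b in zip(bounds, bounds[1:])]
-- ===== Notes on version B (the rewrite author's own statement) =====
-- stated objective: alternative
-- what changed: Replaced A's stateful current/prev_over accumulator loop with a boundary-table decomposition: one comprehension collects the cut indices where the over number resets, and the innings are produced by slicing between consecutive boundaries.
import Mathlib
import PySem

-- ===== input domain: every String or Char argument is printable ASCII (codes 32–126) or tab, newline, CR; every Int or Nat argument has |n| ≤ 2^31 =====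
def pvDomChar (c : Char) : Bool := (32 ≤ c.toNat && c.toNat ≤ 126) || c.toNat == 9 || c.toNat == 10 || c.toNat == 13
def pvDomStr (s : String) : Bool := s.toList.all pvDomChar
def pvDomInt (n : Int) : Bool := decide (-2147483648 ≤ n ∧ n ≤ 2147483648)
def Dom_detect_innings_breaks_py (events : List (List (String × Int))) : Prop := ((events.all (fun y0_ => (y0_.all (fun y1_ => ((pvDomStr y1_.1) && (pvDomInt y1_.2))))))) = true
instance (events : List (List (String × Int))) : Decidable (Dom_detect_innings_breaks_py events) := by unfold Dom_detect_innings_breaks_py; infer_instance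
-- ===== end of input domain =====

-- B replaces A's stateful current/prev_over accumulator by a boundary-table decomposition:
-- one comprehension collects the cut indices, then the result is produced by slicing between
-- consecutive boundaries (objective: alternative decomposition, same O(n) cost).

-- e["over"]: first-match lookup in the association list (Python dict); the `.getD 0`
-- default is unreachable under Pre_ (a missing "over" key is a KeyError, excluded by Pre_).
def pvOver (e : List (String × Int)) : Int := (e.lookup "over").getD 0

-- ===== PORT A =====
-- the body of A's for-loop: state = (innings, current, prev_over)
def pvStepA (st : List (List (List (String × Int))) × List (List (String × Int)) × Int)
    (event : List (String × Int)) :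
    List (List (List (String × Int))) × List (List (String × Int)) × Int :=
  let p := if pvOver event < st.2.2 - 1 then (st.1 ++ [st.2.1], ([] : List (List (String × Int))))
           else (st.1, st.2.1)
  (p.1, p.2 ++ [event], pvOver event)

def detect_innings_breaks_py (events : List (List (String × Int))) : List (List (List (String × Int))) :=
  match events with
  | [] => []
  | e0 :: rest =>
    let fin := rest.foldl pvStepA ([], [e0], pvOver e0)
    if fin.2.1.isEmpty then fin.1 else fin.1 ++ [fin.2.1]

-- ===== PORT B =====
-- cuts = [i for i, (prev, ev) in enumerate(zip(events, events[1:]), 1) if ev["over"] < prev["over"] - 1]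
def pvCutsB (events : List (List (String × Int))) : List Int :=
  ((PySem.List.enumerate (events.zip events.tail) 1).filter
    (fun p => pvOver p.2.2 < pvOver p.2.1 - 1)).map (·.1)

def detect_innings_breaks_py_alt (events : List (List (String × Int))) : List (List (List (String × Int))) :=
  if events.isEmpty then []
  else
    let bounds : List Int := 0 :: pvCutsB events ++ [(events.length : Int)]
    (bounds.zip bounds.tail).map (fun p => PySem.List.slice events (some p.1) (some p.2))

-- ===== PRECONDITION & SPEC =====
-- Pre_ excludes exactly the inputs where Python A raises KeyError: an event without an "over" key.
def Pre_detect_innings_breaks_py (events : List (List (String × Int))) : Prop :=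
  ∀ e ∈ events, (e.lookup "over").isSome = true
instance (events : List (List (String × Int))) : Decidable (Pre_detect_innings_breaks_py events) := by
  unfold Pre_detect_innings_breaks_py; infer_instance

def pvWitness_detect_innings_breaks_py : (List (List (String × Int))) :=
  [[("over", 1)], [("over", 2)], [("over", 0)]]

def Spec_detect_innings_breaks_py (events : List (List (String × Int))) (out : List (List (List (String × Int)))) : Prop := out = detect_innings_breaks_py_alt events
instance (events : List (List (String × Int))) (out : List (List (List (String × Int)))) : Decidable (Spec_detect_innings_breaks_py events out) := by unfold Spec_detect_innings_breaks_py; infer_instance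

-- ===== CLAIM (what is proved, stated in full; the proofs are below) =====
def Claim_equal_detect_innings_breaks_py : Prop := ∀ (events : List (List (String × Int))), Dom_detect_innings_breaks_py events → Pre_detect_innings_breaks_py events → Spec_detect_innings_breaks_py events (detect_innings_breaks_py events)

-- ===== LEMMAS AND PROOFS =====

-- reference recursion for A's loop
def pvGo (prev : Int) (cur : List (List (String × Int))) :
    List (List (String × Int)) → List (List (List (String × Int)))
  | [] => [cur]
  | e :: rest =>
    if pvOver e < prev - 1 then cur :: pvGo (pvOver e) [e] rest
    else pvGo (pvOver e) (cur ++ [e]) rest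

-- common reference: structural grouping
def pvGroups : List (List (String × Int)) → List (List (List (String × Int)))
  | [] => []
  | [x] => [[x]]
  | x :: y :: t =>
    if pvOver y < pvOver x - 1 then [x] :: pvGroups (y :: t)
    else (pvGroups (y :: t)).modifyHead (x :: ·)

-- cut indices, in Nat, by structural recursion
def pvNatCuts : List (List (String × Int)) → List Nat
  | x :: y :: t => (if pvOver y < pvOver x - 1 then [1] else []) ++ (pvNatCuts (y :: t)).map (· + 1)
  | _ => []

-- slices between consecutive Nat boundaries
def pvSliceAll (xs : List (List (String × Int))) (bs : List Nat) : List (List (List (String × Int))) :=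
  (bs.zip bs.tail).map (fun p => (xs.drop p.1).take (p.2 - p.1))

def pvFinish (f : List (List (List (String × Int))) × List (List (String × Int)) × Int) :
    List (List (List (String × Int))) :=
  if f.2.1.isEmpty then f.1 else f.1 ++ [f.2.1]

theorem pvFoldA (rest : List (List (String × Int))) :
    ∀ innings cur prev, cur ≠ [] →
      pvFinish (rest.foldl pvStepA (innings, cur, prev)) = innings ++ pvGo prev cur rest := by
  induction rest with
  | nil =>
    intro innings cur prev h
    simp [pvFinish, pvGo, List.isEmpty_iff, h]
  | cons e t ih =>
    intro innings cur prev h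
    by_cases hc : pvOver e < prev - 1
    · simp only [List.foldl_cons, pvStepA, if_pos hc]
      rw [ih (innings ++ [cur]) ([] ++ [e]) (pvOver e) (by simp)]
      simp [pvGo, if_pos hc]
    · simp only [List.foldl_cons, pvStepA, if_neg hc]
      rw [ih innings (cur ++ [e]) (pvOver e) (by simp)]
      simp [pvGo, if_neg hc]

theorem pvGo_append (rest : List (List (String × Int))) :
    ∀ prev a b, b ≠ [] →
      pvGo prev (a ++ b) rest = (pvGo prev b rest).modifyHead (a ++ ·) := by
  induction rest with
  | nil => intro prev a b _; simp [pvGo]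
  | cons e t ih =>
    intro prev a b hb
    by_cases hc : pvOver e < prev - 1
    · simp [pvGo, if_pos hc]
    · simp only [pvGo, if_neg hc]
      rw [List.append_assoc, ih (pvOver e) a (b ++ [e]) (by simp)]

theorem pvGo_groups (xs : List (List (String × Int))) :
    ∀ x, pvGo (pvOver x) [x] xs = pvGroups (x :: xs) := by
  induction xs with
  | nil => intro x; simp [pvGo, pvGroups]
  | cons y t ih =>
    intro x
    by_cases hc : pvOver y < pvOver x - 1
    · simp only [pvGo, pvGroups, if_pos hc]
      rw [ih y]
    · simp only [pvGo, pvGroups, if_neg hc]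
      rw [pvGo_append t (pvOver y) [x] [y] (by simp), ih y]
      rfl

-- filtered enumeration shifts with its start
theorem pvEnumShift (ps : List ((List (String × Int)) × (List (String × Int)))) :
    ∀ s : Int,
      ((PySem.List.enumerate ps (s + 1)).filter
          (fun p => pvOver p.2.2 < pvOver p.2.1 - 1)).map (·.1)
        = (((PySem.List.enumerate ps s).filter
            (fun p => pvOver p.2.2 < pvOver p.2.1 - 1)).map (·.1)).map (· + 1) := by
  induction ps with
  | nil => intro s; simp [PySem.List.enumerate_nil]
  | cons a t ih =>
    intro s
    rw [PySem.List.enumerate_cons, PySem.List.enumerate_cons]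
    by_cases hc : pvOver a.2 < pvOver a.1 - 1
    · simp only [List.filter_cons, hc, decide_true, if_true, List.map_cons]
      rw [ih (s + 1)]
    · simp only [List.filter_cons, hc, decide_false, Bool.false_eq_true, if_false]
      exact ih (s + 1)

theorem pvCutsB_eq : (events : List (List (String × Int))) →
    pvCutsB events = (pvNatCuts events).map (fun k => ((k : Nat) : Int))
  | [] => by simp [pvCutsB, pvNatCuts, PySem.List.enumerate_nil]
  | [x] => by simp [pvCutsB, pvNatCuts, PySem.List.enumerate_nil]
  | x :: y :: t => by
    have ih := pvCutsB_eq (y :: t)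
    simp only [pvCutsB, List.zip_cons_cons, List.tail_cons] at ih ⊢
    rw [PySem.List.enumerate_cons]
    by_cases hc : pvOver y < pvOver x - 1
    · simp only [List.filter_cons, hc, decide_true, if_true, pvNatCuts, List.map_cons]
      rw [pvEnumShift _ 1, ih]
      simp [List.map_map, Function.comp_def]
    · simp only [List.filter_cons, hc, decide_false, Bool.false_eq_true, if_false, pvNatCuts]
      rw [pvEnumShift _ 1, ih]
      simp [List.map_map, Function.comp_def]

-- consecutive pairs of a mapped list
theorem pvPairs_map {α β : Type} (f : α → β) (bs : List α) :
    (bs.map f).zip (bs.map f).tail = (bs.zip bs.tail).map (Prod.map f f) := by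
  rw [← List.map_tail, List.zip_map]

theorem pvSliceCast (xs : List (List (String × Int))) (bs : List Nat) :
    (((bs.map (fun k => ((k : Nat) : Int))).zip (bs.map (fun k => ((k : Nat) : Int))).tail).map
        (fun p => PySem.List.slice xs (some p.1) (some p.2)))
      = pvSliceAll xs bs := by
  rw [pvPairs_map, List.map_map]
  unfold pvSliceAll
  apply List.map_congr_left
  intro p _
  exact PySem.List.slice_natCast xs p.1 p.2

theorem pvShift (xs : List (List (String × Int))) (x : List (String × Int)) (bs : List Nat) :
    pvSliceAll (x :: xs) (bs.map (· + 1)) = pvSliceAll xs bs := by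
  unfold pvSliceAll
  rw [pvPairs_map, List.map_map]
  apply List.map_congr_left
  intro p _
  simp [Nat.succ_sub_succ]

theorem pvSliceAll_cons (xs : List (List (String × Int))) (a b : Nat) (rest : List Nat) :
    pvSliceAll xs (a :: b :: rest) = ((xs.drop a).take (b - a)) :: pvSliceAll xs (b :: rest) := by
  simp [pvSliceAll]

theorem pvB_main : (xs : List (List (String × Int))) →
    ∀ x, pvSliceAll (x :: xs) (0 :: (pvNatCuts (x :: xs) ++ [xs.length + 1])) = pvGroups (x :: xs)
  | [] => by intro x; simp [pvNatCuts, pvSliceAll, pvGroups]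
  | y :: t => by
    intro x
    have ih := pvB_main t y
    by_cases hc : pvOver y < pvOver x - 1
    · simp only [pvNatCuts, if_pos hc, List.cons_append,
        List.nil_append, List.length_cons]
      rw [pvSliceAll_cons]
      rw [show ((1 : Nat) :: ((pvNatCuts (y :: t)).map (· + 1) ++ [t.length + 1 + 1]))
            = ((0 :: (pvNatCuts (y :: t) ++ [t.length + 1])).map (· + 1)) by simp]
      rw [pvShift, ih]
      simp [pvGroups, if_pos hc]
    · simp only [pvNatCuts, if_neg hc, List.nil_append, List.length_cons]
      cases hnc : pvNatCuts (y :: t) with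
      | nil =>
        rw [hnc] at ih
        have h2 : pvGroups (y :: t) = [y :: t] := by
          rw [← ih]
          simp only [pvSliceAll, List.nil_append, List.zip_cons_cons, List.tail_cons,
            List.zip_nil_right, List.map_cons, List.map_nil, Nat.sub_zero, List.drop_zero]
          rw [show (t.length + 1) = (y :: t).length by simp, List.take_length]
        simp only [List.map_nil, List.nil_append, pvSliceAll, List.zip_cons_cons,
          List.tail_cons, List.zip_nil_right, List.map_cons, List.map_nil,
          Nat.sub_zero, List.drop_zero]
        rw [show (t.length + 1 + 1) = (x :: y :: t).length by simp, List.take_length]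
        simp [pvGroups, if_neg hc, h2]
      | cons c cs =>
        rw [hnc] at ih
        simp only [List.map_cons, List.cons_append]
        rw [pvSliceAll_cons]
        rw [show ((c + 1) :: ((cs.map (· + 1)) ++ [t.length + 1 + 1]))
              = ((c :: (cs ++ [t.length + 1])).map (· + 1)) by simp]
        rw [pvShift]
        have h2 : pvGroups (y :: t)
            = ((y :: t).take c) :: pvSliceAll (y :: t) (c :: (cs ++ [t.length + 1])) := by
          rw [← ih]
          simp only [List.cons_append]
          rw [pvSliceAll_cons]
          simp
        simp [pvGroups, if_neg hc, h2, List.take_succ_cons]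

-- ===== VERDICT (by name: the statement is the Claim_ definition above) =====
theorem detect_innings_breaks_py_spec : Claim_equal_detect_innings_breaks_py := by
  intro events _ _
  unfold Spec_detect_innings_breaks_py
  cases events with
  | nil => rfl
  | cons x xs =>
    have hA : detect_innings_breaks_py (x :: xs) = pvGroups (x :: xs) := by
      have := pvFoldA xs [] [x] (pvOver x) (by simp)
      simpa [detect_innings_breaks_py, pvFinish, pvGo_groups xs x] using this
    have hB : detect_innings_breaks_py_alt (x :: xs) = pvGroups (x :: xs) := by
      have hb : (0 :: pvCutsB (x :: xs) ++ [((x :: xs).length : Int)])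
          = (0 :: pvNatCuts (x :: xs) ++ [xs.length + 1]).map (fun k => ((k : Nat) : Int)) := by
        rw [pvCutsB_eq (x :: xs)]
        simp
      simp only [detect_innings_breaks_py_alt, List.isEmpty_cons, Bool.false_eq_true,
        if_false]
      rw [hb, pvSliceCast]
      simp only [List.cons_append]
      rw [pvB_main xs x]
    rw [hA, hB]
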